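-- pv_equiv track=rewrite | github.com/frendor/adventofcode | 2020/2020-12-14/tag14.py | parse_mask
-- ===== SOURCE A (Python) =====
-- def parse_mask(mask):
--     mask_dict = {'1':[],
--                  '0':[],
--                  'X':[]}
--     for bitnr,char in enumerate(reversed(list(mask))):
--         if char in ['0','1','X']:
--             mask_dict[char].append(bitnr)
--     return mask_dict
-- ===== SOURCE B (Python) =====
-- def parse_mask(mask):
--     bits = list(enumerate(reversed(list(mask))))
--     return {c: [i for i, ch in bits if ch == c] for c in ('1', '0', 'X')}
-- ===== Notes on version B (the rewrite author's own statement) =====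
-- stated objective: idiomatic
-- what changed: Replaces A's single dispatching pass that appends into a pre-built three-key dict with a dict comprehension that makes one filtering pass per key over the enumerated reversed mask.
import Mathlib
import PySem

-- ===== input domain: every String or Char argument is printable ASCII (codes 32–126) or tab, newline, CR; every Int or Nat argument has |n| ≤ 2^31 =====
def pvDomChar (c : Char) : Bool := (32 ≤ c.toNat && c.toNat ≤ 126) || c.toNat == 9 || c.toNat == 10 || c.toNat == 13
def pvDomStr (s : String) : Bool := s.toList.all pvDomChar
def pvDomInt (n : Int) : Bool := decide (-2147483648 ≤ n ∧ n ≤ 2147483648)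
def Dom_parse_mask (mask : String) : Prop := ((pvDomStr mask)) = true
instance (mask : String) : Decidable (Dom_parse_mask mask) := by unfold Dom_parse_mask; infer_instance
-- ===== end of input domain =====

-- B replaces A's single dispatching pass into a pre-built three-key dict with an idiomatic
-- dict comprehension: one filtering pass per key over the enumerated reversed mask (same cost).
-- ===== PORT A =====
def parse_mask (mask : String) : List (String × List Int) :=
  let mask_dict : PySem.Dict String (List Int) :=
    PySem.Dict.ofList [("1", []), ("0", []), ("X", [])]
  ((PySem.List.enumerate mask.toList.reverse).foldl
      (fun d (p : Int × Char) =>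
        if String.ofList [p.2] ∈ ["0", "1", "X"] then
          d.modify (String.ofList [p.2]) [] (fun l => l ++ [p.1])
        else d)
      mask_dict).items

-- ===== PORT B =====
def parse_mask_alt (mask : String) : List (String × List Int) :=
  let bits := PySem.List.enumerate mask.toList.reverse
  ["1", "0", "X"].map (fun c =>
    (c, bits.filterMap (fun p => if String.ofList [p.2] = c then some p.1 else none)))

-- ===== PRECONDITION & SPEC =====
def Spec_parse_mask (mask : String) (out : List (String × List Int)) : Prop := out = parse_mask_alt mask
instance (mask : String) (out : List (String × List Int)) : Decidable (Spec_parse_mask mask out) := by unfold Spec_parse_mask; infer_instance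

-- ===== CLAIM (what is proved, stated in full; the proofs are below) =====
def Claim_equal_parse_mask : Prop := ∀ (mask : String), Dom_parse_mask mask → Spec_parse_mask mask (parse_mask mask)

-- ===== LEMMAS AND PROOFS =====

-- ===== VERDICT (by name: the statement is the Claim_ definition above) =====
lemma fold_eq (ps : List (Int × Char)) (a b c : List Int) :
    (ps.foldl
      (fun d (p : Int × Char) =>
        if String.ofList [p.2] ∈ ["0", "1", "X"] then
          d.modify (String.ofList [p.2]) [] (fun l => l ++ [p.1])
        else d)
      (PySem.Dict.mk [("1", a), ("0", b), ("X", c)])) =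
    PySem.Dict.mk
      [("1", a ++ ps.filterMap (fun p => if String.ofList [p.2] = "1" then some p.1 else none)),
       ("0", b ++ ps.filterMap (fun p => if String.ofList [p.2] = "0" then some p.1 else none)),
       ("X", c ++ ps.filterMap (fun p => if String.ofList [p.2] = "X" then some p.1 else none))] := by
  induction ps generalizing a b c with
  | nil => simp
  | cons hd tl ih =>
    obtain ⟨i, ch⟩ := hd
    by_cases h1 : ch = '1'
    · subst h1
      simp only [List.foldl_cons, List.filterMap_cons]
      rw [if_pos (by decide)]
      have hm : (PySem.Dict.mk [("1", a), ("0", b), ("X", c)]).modify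
          (String.ofList ['1']) [] (fun l => l ++ [i]) =
          PySem.Dict.mk [("1", a ++ [i]), ("0", b), ("X", c)] := by
        simp [PySem.Dict.modify, PySem.Dict.contains, PySem.Dict.getD, PySem.Dict.get?, PySem.Dict.insert, String.ext_iff]
      rw [hm, ih]
      simp [String.ext_iff]
    · by_cases h0 : ch = '0'
      · subst h0
        simp only [List.foldl_cons, List.filterMap_cons]
        rw [if_pos (by decide)]
        have hm : (PySem.Dict.mk [("1", a), ("0", b), ("X", c)]).modify
            (String.ofList ['0']) [] (fun l => l ++ [i]) =
            PySem.Dict.mk [("1", a), ("0", b ++ [i]), ("X", c)] := by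
          simp [PySem.Dict.modify, PySem.Dict.contains, PySem.Dict.getD, PySem.Dict.get?, PySem.Dict.insert, String.ext_iff]
        rw [hm, ih]
        simp [String.ext_iff]
      · by_cases hX : ch = 'X'
        · subst hX
          simp only [List.foldl_cons, List.filterMap_cons]
          rw [if_pos (by decide)]
          have hm : (PySem.Dict.mk [("1", a), ("0", b), ("X", c)]).modify
              (String.ofList ['X']) [] (fun l => l ++ [i]) =
              PySem.Dict.mk [("1", a), ("0", b), ("X", c ++ [i])] := by
            simp [PySem.Dict.modify, PySem.Dict.contains, PySem.Dict.getD, PySem.Dict.get?, PySem.Dict.insert, String.ext_iff]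
          rw [hm, ih]
          simp [String.ext_iff]
        · have hne : ∀ s, s ∈ (["0", "1", "X"] : List String) → String.ofList [ch] ≠ s := by
            intro s hs
            fin_cases hs <;> simp [String.ext_iff] <;> simpa using ‹_›
          simp only [List.foldl_cons, List.filterMap_cons]
          rw [if_neg (by
            intro hmem
            exact hne _ hmem rfl)]
          rw [ih]
          simp only [if_neg (hne "1" (by simp)), if_neg (hne "0" (by simp)),
            if_neg (hne "X" (by simp))]

theorem parse_mask_spec : Claim_equal_parse_mask := by
  intro mask _
  unfold Spec_parse_mask parse_mask parse_mask_alt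
  simp only []
  rw [show (PySem.Dict.ofList [("1", ([] : List Int)), ("0", []), ("X", [])]) =
      PySem.Dict.mk [("1", []), ("0", []), ("X", [])] from by decide]
  rw [fold_eq]
  simp [List.map]
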